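-- pv_equiv track=rewrite | github.com/miliar/Code_Jam_Webscraper | Solutions_python/Problem_207/23.py | calc_inner
-- ===== SOURCE A (Python) =====
-- def inter(A,B):
-- 	out = ''
-- 	for i,j in zip(A,B):
-- 		out += i+j
-- 	return out
--
-- def calc_inner(r,y,b):
-- 	n=r+y+b
-- 	dom = max(r,y,b)
-- 	if n-dom < dom:
-- 		return 'IMPOSSIBLE'
-- 	if n-dom == dom:
-- 		if r==dom:
-- 			return inter('R'*dom,'B'*b+'Y'*y)
-- 		if b==dom:
-- 			return inter('B'*dom,'R'*r+'Y'*y)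
-- 		if y==dom:
-- 			return inter('Y'*dom,'B'*b+'R'*r)
-- 	t=n-dom-dom
-- 	if t==dom:
-- 		return 'RYB'*t
-- 	ret = calc_inner(r-t,y-t,b-t)
-- 	if ret[0] == 'R':
-- 		return 'RBY'*t+ret
-- 	if ret[0] == 'Y':
-- 		return 'YRB'*t+ret
-- 	if ret[0] == 'B':
-- 		return 'BYR'*t+ret
-- ===== SOURCE B (Python) =====
-- def calc_inner(r, y, b):
--     n = r + y + b
--     dom = max(r, y, b)
--     if n - dom < dom:
--         return 'IMPOSSIBLE'
--     t = n - 2 * dom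
--     if t == dom:
--         return 'RYB' * t
--     # inline A's single level of recursion: reduced counts all drop by t,
--     # and the reduced instance is always the balanced (n-dom == dom) case
--     rr, yy, bb = r - t, y - t, b - t
--     d = dom - t
--     if rr == d:
--         core = ''.join(i + j for i, j in zip('R' * d, 'B' * bb + 'Y' * yy))
--         prefix = 'RBY'
--     elif bb == d:
--         core = ''.join(i + j for i, j in zip('B' * d, 'R' * rr + 'Y' * yy))
--         prefix = 'BYR'
--     else:
--         core = ''.join(i + j for i, j in zip('Y' * d, 'B' * bb + 'R' * rr))
--         prefix = 'YRB'
--     return prefix * t + core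
-- ===== Notes on version B (the rewrite author's own statement) =====
-- stated objective: alternative
-- what changed: B eliminates A's two-level recursion: it computes t=n-2*dom once and builds the answer directly as prefix-triple*t plus an interleaved core produced by ''.join over zip, instead of recursing and re-dispatching on ret[0]; the accumulating += loop (inter) is gone.
import Mathlib
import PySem

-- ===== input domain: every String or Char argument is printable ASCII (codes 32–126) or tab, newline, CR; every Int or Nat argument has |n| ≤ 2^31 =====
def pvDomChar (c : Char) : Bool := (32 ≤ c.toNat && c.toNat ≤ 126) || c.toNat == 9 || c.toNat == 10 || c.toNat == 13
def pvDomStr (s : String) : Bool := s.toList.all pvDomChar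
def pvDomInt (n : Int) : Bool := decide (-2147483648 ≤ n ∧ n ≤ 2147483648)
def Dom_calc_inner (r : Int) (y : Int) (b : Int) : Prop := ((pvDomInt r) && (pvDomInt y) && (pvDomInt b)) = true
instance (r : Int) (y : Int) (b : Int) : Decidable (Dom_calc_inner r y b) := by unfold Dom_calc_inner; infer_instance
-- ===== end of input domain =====

-- B inlines A's two-level recursion into one direct construction (prefix triple * t ++ join-of-zip core);
-- objective: alternative (no recursion, no accumulating += loop). Both programs are total; return values only.

-- ===== PORT A =====
-- Python strings are carried as List Char (PySem convention) and wrapped with String.ofList at the returns.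
-- termination measure fact for the port's recursion (cited by name in decreasing_by)
theorem calc_inner_dec (r y b : Int)
    (h5 : ¬ (r + y + b - max r (max y b) < max r (max y b)))
    (h6 : ¬ (r + y + b - max r (max y b) = max r (max y b))) :
    (r - (r + y + b - max r (max y b) - max r (max y b)) + (y - (r + y + b - max r (max y b) - max r (max y b))) +
        (b - (r + y + b - max r (max y b) - max r (max y b))) -
        2 * max (r - (r + y + b - max r (max y b) - max r (max y b)))
          (max (y - (r + y + b - max r (max y b) - max r (max y b)))
            (b - (r + y + b - max r (max y b) - max r (max y b))))).toNat <
      (r + y + b - 2 * max r (max y b)).toNat := by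
  rw [max_sub_sub_right y b, max_sub_sub_right r (max y b)]
  rw [show r - (r + y + b - max r (max y b) - max r (max y b)) + (y - (r + y + b - max r (max y b) - max r (max y b))) +
        (b - (r + y + b - max r (max y b) - max r (max y b))) -
        2 * (max r (max y b) - (r + y + b - max r (max y b) - max r (max y b))) = 0 from by ring]
  rw [show r + y + b - 2 * max r (max y b) = r + y + b - max r (max y b) - max r (max y b) from by ring]
  have hpos : 0 < r + y + b - max r (max y b) - max r (max y b) :=
    sub_pos.mpr (lt_of_le_of_ne (not_lt.mp h5) (fun h => h6 h.symm))
  simpa using hpos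

-- inter(A,B): out = ''; for i,j in zip(A,B): out += i+j
def interA (A : List Char) (B : List Char) : List Char :=
  (A.zip B).foldl (fun out p => out ++ [p.1, p.2]) []

def calc_inner (r : Int) (y : Int) (b : Int) : Option String :=
  let n := r + y + b
  let dom := max r (max y b)
  if _h1 : n - dom < dom then some "IMPOSSIBLE"
  else if _h2 : n - dom = dom then
    if r = dom then some (String.ofList (interA (PySem.List.pyRepeat ['R'] dom) (PySem.List.pyRepeat ['B'] b ++ PySem.List.pyRepeat ['Y'] y)))
    else if b = dom then some (String.ofList (interA (PySem.List.pyRepeat ['B'] dom) (PySem.List.pyRepeat ['R'] r ++ PySem.List.pyRepeat ['Y'] y)))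
    else if y = dom then some (String.ofList (interA (PySem.List.pyRepeat ['Y'] dom) (PySem.List.pyRepeat ['B'] b ++ PySem.List.pyRepeat ['R'] r)))
    else none  -- Python falls off the function (returns None); unreachable since dom = max(r,y,b)
  else
    let t := n - dom - dom
    if _h3 : t = dom then some (String.ofList (PySem.List.pyRepeat ['R', 'Y', 'B'] t))
    else
      match calc_inner (r - t) (y - t) (b - t) with
      | some ret =>
        match PySem.List.pyGet? ret.toList 0 with  -- ret[0]; none = IndexError (unreachable)
        | some c =>
          if c = 'R' then some (String.ofList (PySem.List.pyRepeat ['R', 'B', 'Y'] t ++ ret.toList))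
          else if c = 'Y' then some (String.ofList (PySem.List.pyRepeat ['Y', 'R', 'B'] t ++ ret.toList))
          else if c = 'B' then some (String.ofList (PySem.List.pyRepeat ['B', 'Y', 'R'] t ++ ret.toList))
          else none  -- Python returns None; unreachable
        | none => none
      | none => none  -- ret = None: Python would raise on ret[0]; unreachable
termination_by ((r + y + b) - 2 * max r (max y b)).toNat
decreasing_by
  exact calc_inner_dec r y b _h1 _h2

-- ===== PORT B =====
def calc_inner_alt (r : Int) (y : Int) (b : Int) : Option String :=
  let n := r + y + b
  let dom := max r (max y b)
  if n - dom < dom then some "IMPOSSIBLE"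
  else
    let t := n - 2 * dom
    if t = dom then some (String.ofList (PySem.List.pyRepeat ['R', 'Y', 'B'] t))
    else
      let rr := r - t
      let yy := y - t
      let bb := b - t
      let d := dom - t
      -- ''.join(i+j for i,j in zip(X, Y)) ported as flatten of the mapped zip
      let cp : List Char × List Char :=
        if rr = d then
          ((((PySem.List.pyRepeat ['R'] d).zip (PySem.List.pyRepeat ['B'] bb ++ PySem.List.pyRepeat ['Y'] yy)).map (fun p => [p.1, p.2])).flatten, ['R', 'B', 'Y'])
        else if bb = d then
          ((((PySem.List.pyRepeat ['B'] d).zip (PySem.List.pyRepeat ['R'] rr ++ PySem.List.pyRepeat ['Y'] yy)).map (fun p => [p.1, p.2])).flatten, ['B', 'Y', 'R'])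
        else
          ((((PySem.List.pyRepeat ['Y'] d).zip (PySem.List.pyRepeat ['B'] bb ++ PySem.List.pyRepeat ['R'] rr)).map (fun p => [p.1, p.2])).flatten, ['Y', 'R', 'B'])
      some (String.ofList (PySem.List.pyRepeat cp.2 t ++ cp.1))

-- ===== PRECONDITION & SPEC =====
def Spec_calc_inner (r : Int) (y : Int) (b : Int) (out : Option String) : Prop := out = calc_inner_alt r y b
instance (r : Int) (y : Int) (b : Int) (out : Option String) : Decidable (Spec_calc_inner r y b out) := by unfold Spec_calc_inner; infer_instance

-- ===== CLAIM (what is proved, stated in full; the proofs are below) =====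
def Claim_equal_calc_inner : Prop := ∀ (r : Int) (y : Int) (b : Int), Dom_calc_inner r y b → Spec_calc_inner r y b (calc_inner r y b)

-- ===== LEMMAS AND PROOFS =====
lemma pyRepeat_zero (xs : List Char) : PySem.List.pyRepeat xs 0 = [] := by
  simp [PySem.List.pyRepeat]

lemma interA_eq (X Y : List Char) :
    interA X Y = ((X.zip Y).map (fun p => [p.1, p.2])).flatten := by
  simp [interA]

lemma rep_append_ne_nil (c1 c2 : Char) (k1 k2 : Int) (hs : 0 < k1 + k2) (h1 : 0 ≤ k1) (h2 : 0 ≤ k2) :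
    PySem.List.pyRepeat [c1] k1 ++ PySem.List.pyRepeat [c2] k2 ≠ [] := by
  simp only [PySem.List.pyRepeat_singleton, ne_eq, List.append_eq_nil_iff, List.replicate_eq_nil_iff, not_and]
  omega

lemma interA_head (c : Char) (d : Int) (W : List Char) (hd : 0 < d) (hW : W ≠ []) :
    PySem.List.pyGet? ((((PySem.List.pyRepeat [c] d).zip W).map (fun p => [p.1, p.2])).flatten) 0 = some c := by
  rw [PySem.List.pyRepeat_singleton]
  obtain ⟨k, hk⟩ : ∃ k, d.toNat = k + 1 := ⟨d.toNat - 1, by omega⟩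
  obtain ⟨w, ws, rfl⟩ := List.exists_cons_of_ne_nil hW
  rw [hk, List.replicate_succ]
  simp [PySem.List.pyGet?_zero_cons]

theorem calc_inner_main (r y b : Int) : calc_inner r y b = calc_inner_alt r y b := by
  have hr : r ≤ max r (max y b) := le_max_left _ _
  have hy : y ≤ max r (max y b) := le_trans (le_max_left _ _) (le_max_right _ _)
  have hb : b ≤ max r (max y b) := le_trans (le_max_right _ _) (le_max_right _ _)
  rw [calc_inner.eq_def, calc_inner_alt]
  set m := max r (max y b) with hm
  by_cases h1 : r + y + b - m < m
  · rw [dif_pos h1, if_pos h1]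
  · rw [dif_neg h1, if_neg h1]
    have e : r + y + b - m - m = r + y + b - 2 * m := by ring
    rw [e]
    by_cases h2 : r + y + b - m = m
    · rw [dif_pos h2]
      by_cases hd0 : m = 0
      · have hr0 : r = 0 := by omega
        have hy0 : y = 0 := by omega
        have hb0 : b = 0 := by omega
        rw [if_pos (by omega : r + y + b - 2 * m = m), if_pos (by omega : r = m)]
        rw [hr0, hy0, hb0, hd0]
        simp [interA, PySem.List.pyRepeat]
      · have htd : ¬ (r + y + b - 2 * m = m) := by omega
        have ht0 : r + y + b - 2 * m = 0 := by omega
        rw [if_neg htd, ht0]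
        simp only [sub_zero]
        by_cases hR : r = m
        · rw [if_pos hR, if_pos hR, interA_eq]
          simp [pyRepeat_zero]
        · by_cases hB : b = m
          · rw [if_neg hR, if_pos hB, if_neg hR, if_pos hB, interA_eq]
            simp [pyRepeat_zero]
          · have hY : y = m := by omega
            rw [if_neg hR, if_neg hB, if_pos hY, if_neg hR, if_neg hB, interA_eq]
            simp [pyRepeat_zero]
    · rw [dif_neg h2]
      by_cases h3 : r + y + b - 2 * m = m
      · rw [dif_pos h3, if_pos h3]
      · rw [dif_neg h3, if_neg h3]
        have ht0 : 0 < r + y + b - 2 * m := by omega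
        have htm : r + y + b - 2 * m < m := by omega
        rw [calc_inner.eq_def]
        have hmax : max (r - (r + y + b - 2 * m)) (max (y - (r + y + b - 2 * m)) (b - (r + y + b - 2 * m))) = m - (r + y + b - 2 * m) := by
          rw [max_sub_sub_right y b, max_sub_sub_right r (max y b), ← hm]
        rw [hmax]
        rw [dif_neg (by omega : ¬ (r - (r + y + b - 2 * m) + (y - (r + y + b - 2 * m)) + (b - (r + y + b - 2 * m)) - (m - (r + y + b - 2 * m)) < m - (r + y + b - 2 * m)))]
        rw [dif_pos (by omega : r - (r + y + b - 2 * m) + (y - (r + y + b - 2 * m)) + (b - (r + y + b - 2 * m)) - (m - (r + y + b - 2 * m)) = m - (r + y + b - 2 * m))]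
        by_cases hR : r = m
        · rw [if_pos (by omega : r - (r + y + b - 2 * m) = m - (r + y + b - 2 * m))]
          have hhead := interA_head 'R' (m - (r + y + b - 2 * m))
            (PySem.List.pyRepeat ['B'] (b - (r + y + b - 2 * m)) ++ PySem.List.pyRepeat ['Y'] (y - (r + y + b - 2 * m)))
            (by omega) (rep_append_ne_nil _ _ _ _ (by omega) (by omega) (by omega))
          simp only [String.toList_ofList, interA_eq]
          rw [hhead]
          simp [show r - (r + y + b - 2 * m) = m - (r + y + b - 2 * m) from by omega]
        · by_cases hB : b = m
          · rw [if_neg (by omega : ¬ (r - (r + y + b - 2 * m) = m - (r + y + b - 2 * m)))]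
            rw [if_pos (by omega : b - (r + y + b - 2 * m) = m - (r + y + b - 2 * m))]
            have hhead := interA_head 'B' (m - (r + y + b - 2 * m))
              (PySem.List.pyRepeat ['R'] (r - (r + y + b - 2 * m)) ++ PySem.List.pyRepeat ['Y'] (y - (r + y + b - 2 * m)))
              (by omega) (rep_append_ne_nil _ _ _ _ (by omega) (by omega) (by omega))
            simp only [String.toList_ofList, interA_eq]
            rw [hhead]
            simp [show ¬ (r - (r + y + b - 2 * m) = m - (r + y + b - 2 * m)) from by omega,
                  show b - (r + y + b - 2 * m) = m - (r + y + b - 2 * m) from by omega]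
          · have hY : y = m := by omega
            rw [if_neg (by omega : ¬ (r - (r + y + b - 2 * m) = m - (r + y + b - 2 * m)))]
            rw [if_neg (by omega : ¬ (b - (r + y + b - 2 * m) = m - (r + y + b - 2 * m)))]
            rw [if_pos (by omega : y - (r + y + b - 2 * m) = m - (r + y + b - 2 * m))]
            have hhead := interA_head 'Y' (m - (r + y + b - 2 * m))
              (PySem.List.pyRepeat ['B'] (b - (r + y + b - 2 * m)) ++ PySem.List.pyRepeat ['R'] (r - (r + y + b - 2 * m)))
              (by omega) (rep_append_ne_nil _ _ _ _ (by omega) (by omega) (by omega))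
            simp only [String.toList_ofList, interA_eq]
            rw [hhead]
            simp [show ¬ (r - (r + y + b - 2 * m) = m - (r + y + b - 2 * m)) from by omega,
                  show ¬ (b - (r + y + b - 2 * m) = m - (r + y + b - 2 * m)) from by omega]

-- ===== VERDICT (by name: the statement is the Claim_ definition above) =====
theorem calc_inner_spec : Claim_equal_calc_inner := by
  intro r y b _
  exact calc_inner_main r y b
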